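-- pv_equiv track=rewrite | github.com/markwgirard/markwgirard.github.io | riddlers/code/20210409.py | solution
-- ===== SOURCE A (Python) =====
-- from collections import defaultdict
--
-- def makeEdges(m,n):
--     edges = []
--     for i in range(m):
--         for j in range(n):
--             if i < m - 1 :
--                 edges.append([(i,j),(i+1,j)])
--             if j < n - 1 :
--                 edges.append([(i,j),(i,j+1)])
--     return edges
--
-- def makeNeighbours(edges, directions):
--     neighbours = defaultdict(set)
--     for k, [a, b] in enumerate(edges):
--         if int(directions[k]):
--             a, b = b, a
--         neighbours[a].add(b)
--     return neighbours
--
-- def existsPath(start,end,neighbours):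
--     visited = set([start])
--     nodes = [start]
--     while nodes:
--         new_nodes = []
--         for node in nodes:
--             for neighbour in neighbours[node]:
--                 if neighbour == end:
--                     return True
--                 if (neighbour not in visited):
--                     visited.add(neighbour)
--                     new_nodes.append(neighbour)
--         nodes = new_nodes
--     return False
--
-- def solution(m,n):
--     edges = makeEdges(m,n)
--     feasible = []
--     num_edges = len(edges)
--     count = 0
--     for i in range(2**num_edges):
--         neighbours = makeNeighbours(edges,format(i, '0'+str(num_edges)+'b'))
--         if existsPath((0,0),(m-1,n-1),neighbours):
--            count += 1
--            feasible.append(i)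
--     return count, 2**num_edges
-- ===== SOURCE B (Python) =====
-- from collections import defaultdict
--
--
-- def _reaches(start, end, adj):
--     # recursive DFS with a shared visited set; tests only neighbours against end
--     visited = {start}
--
--     def dfs(node):
--         for nb in adj[node]:
--             if nb == end:
--                 return True
--             if nb not in visited:
--                 visited.add(nb)
--                 if dfs(nb):
--                     return True
--         return False
--
--     return dfs(start)
--
--
-- def solution(m, n):
--     edges = [e
--              for i in range(m)
--              for j in range(n)
--              for e in (([((i, j), (i + 1, j))] if i < m - 1 else [])
--                        + ([((i, j), (i, j + 1))] if j < n - 1 else []))]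
--     num_edges = len(edges)
--     count = 0
--     for code in range(2 ** num_edges):
--         adj = defaultdict(set)
--         for k, (a, b) in enumerate(edges):
--             if (code >> (num_edges - 1 - k)) & 1:
--                 a, b = b, a
--             adj[a].add(b)
--         if _reaches((0, 0), (m - 1, n - 1), adj):
--             count += 1
--     return count, 2 ** num_edges
-- ===== Notes on version B (the rewrite author's own statement) =====
-- stated objective: alternative
-- what changed: Per-orientation reachability is a recursive depth-first search with a shared visited set and early exit instead of the original level-by-level BFS with an explicit frontier list; edge directions are read off by integer bit shifts instead of formatting each index as a zero-padded binary string; the edge list is built by one comprehension instead of nested append loops.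
import Mathlib
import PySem

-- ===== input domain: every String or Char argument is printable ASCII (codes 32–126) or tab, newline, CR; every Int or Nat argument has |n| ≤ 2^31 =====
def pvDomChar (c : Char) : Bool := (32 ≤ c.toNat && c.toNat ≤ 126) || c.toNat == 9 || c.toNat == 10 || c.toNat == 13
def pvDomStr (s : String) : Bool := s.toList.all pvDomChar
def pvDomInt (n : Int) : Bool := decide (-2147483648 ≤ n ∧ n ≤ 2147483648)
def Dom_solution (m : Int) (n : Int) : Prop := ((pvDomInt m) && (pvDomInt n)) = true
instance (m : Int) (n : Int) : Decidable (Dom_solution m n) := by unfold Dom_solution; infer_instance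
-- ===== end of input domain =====

-- B replaces the level-by-level BFS reachability check by a recursive DFS and reads edge
-- directions by bit shifts instead of binary-string formatting (objective: alternative).

-- ===== PORT A =====

-- makeEdges: nested for-loops appending the downward and rightward edge of each cell
def pvMakeEdges (m n : Int) : List ((Int × Int) × (Int × Int)) :=
  (PySem.List.pyRange 0 m 1).foldl (fun acc i =>
    (PySem.List.pyRange 0 n 1).foldl (fun acc j =>
      let acc := if i < m - 1 then acc ++ [((i, j), (i + 1, j))] else acc
      if j < n - 1 then acc ++ [((i, j), (i, j + 1))] else acc) acc) []

-- defaultdict(set) read: a missing key reads as the empty set (the defaultdict also inserts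
-- the empty entry on read, which no later step can observe; exact for the result)
def pvAdjGet : List ((Int × Int) × List (Int × Int)) → (Int × Int) → List (Int × Int)
  | [], _ => []
  | (k, s) :: rest, x => if k = x then s else pvAdjGet rest x

-- neighbours[a].add(b) on a defaultdict(set): sets are lists of distinct elements, insertion order
def pvAdjAdd : List ((Int × Int) × List (Int × Int)) → (Int × Int) → (Int × Int) →
    List ((Int × Int) × List (Int × Int))
  | [], a, b => [(a, [b])]
  | (k, s) :: rest, a, b =>
    if k = a then (k, if b ∈ s then s else s ++ [b]) :: rest
    else (k, s) :: pvAdjAdd rest a b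

-- format(i, '0wb') followed by int() of each character, as the list of digit values;
-- exact for i ≥ 0 (the only arguments A passes): minimal binary digits, left-padded with 0s
def pvNatBinDigits : Nat → List Nat
  | 0 => []
  | n + 1 => pvNatBinDigits ((n + 1) / 2) ++ [(n + 1) % 2]
decreasing_by exact Nat.div_lt_self (Nat.succ_pos n) one_lt_two

def pvFormatBin (i w : Nat) : List Nat :=
  let ds := if i = 0 then [0] else pvNatBinDigits i
  List.replicate (w - ds.length) 0 ++ ds

-- makeNeighbours: for k, [a, b] in enumerate(edges): swap a,b when int(directions[k]) is nonzero
def pvMakeNeighbours (edges : List ((Int × Int) × (Int × Int))) (dirs : List Nat) :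
    List ((Int × Int) × List (Int × Int)) :=
  (PySem.List.enumerate edges).foldl (fun adj p =>
    if PySem.List.pyGetD dirs p.1 0 ≠ 0 then pvAdjAdd adj p.2.2 p.2.1
    else pvAdjAdd adj p.2.1 p.2.2) []

-- existsPath's inner neighbour scan: early-returns (none) on end, else grows visited/new_nodes
def pvScanNbrs (e : Int × Int) : List (Int × Int) → List (Int × Int) → List (Int × Int) →
    Option (List (Int × Int) × List (Int × Int))
  | [], visited, newNodes => some (visited, newNodes)
  | nb :: rest, visited, newNodes =>
    if nb = e then none
    else if nb ∈ visited then pvScanNbrs e rest visited newNodes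
    else pvScanNbrs e rest (visited ++ [nb]) (newNodes ++ [nb])

-- existsPath's per-level loop over nodes
def pvScanLevel (e : Int × Int) (adj : List ((Int × Int) × List (Int × Int))) :
    List (Int × Int) → List (Int × Int) → List (Int × Int) →
    Option (List (Int × Int) × List (Int × Int))
  | [], visited, newNodes => some (visited, newNodes)
  | node :: rest, visited, newNodes =>
    match pvScanNbrs e (pvAdjGet adj node) visited newNodes with
    | none => none
    | some (v, nn) => pvScanLevel e adj rest v nn

-- the while-nodes loop; the fuel only makes the loop total (visited grows every round, so the
-- fuel chosen in pvExistsPath is never exhausted)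
def pvBfsLoop (e : Int × Int) (adj : List ((Int × Int) × List (Int × Int))) :
    Nat → List (Int × Int) → List (Int × Int) → Bool
  | _, [], _ => false
  | 0, _ :: _, _ => false
  | fuel + 1, node :: rest, visited =>
    match pvScanLevel e adj (node :: rest) visited [] with
    | none => true
    | some (v, nn) => pvBfsLoop e adj fuel nn v

def pvExistsPath (s e : Int × Int) (adj : List ((Int × Int) × List (Int × Int))) : Bool :=
  pvBfsLoop e adj (s :: adj.flatMap (·.2)).length [s] [s]

-- A's loop body: build neighbours from the formatted direction string, count and record i
def pvLoopA (m n : Int) (edges : List ((Int × Int) × (Int × Int)))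
    (acc : Int × List Int) (i : Int) : Int × List Int :=
  let neighbours := pvMakeNeighbours edges (pvFormatBin i.toNat edges.length)
  if pvExistsPath (0, 0) (m - 1, n - 1) neighbours then (acc.1 + 1, acc.2 ++ [i]) else acc

def solution (m : Int) (n : Int) : Int × Int :=
  let edges := pvMakeEdges m n
  let numEdges := edges.length
  let st := (PySem.List.pyRange 0 ((2 : Int) ^ numEdges) 1).foldl (pvLoopA m n edges)
    ((0 : Int), ([] : List Int))
  (st.1, (2 : Int) ^ numEdges)

-- ===== PORT B =====

-- edge list by comprehension
def pvMakeEdgesAlt (m n : Int) : List ((Int × Int) × (Int × Int)) :=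
  (PySem.List.pyRange 0 m 1).flatMap (fun i =>
    (PySem.List.pyRange 0 n 1).flatMap (fun j =>
      (if i < m - 1 then [((i, j), (i + 1, j))] else []) ++
      (if j < n - 1 then [((i, j), (i, j + 1))] else [])))

-- the recursive dfs closure: walks a neighbour list, descending on unvisited nodes; the shared
-- visited set is threaded through; the fuel only makes it total (every descent has just added
-- a fresh node to visited, so the fuel chosen in pvReaches is never exhausted)
def pvDfsGo (e : Int × Int) (adj : List ((Int × Int) × List (Int × Int))) :
    Nat → List (Int × Int) → List (Int × Int) → Bool × List (Int × Int)
  | _, visited, [] => (false, visited)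
  | fuel, visited, nb :: rest =>
    if nb = e then (true, visited)
    else if nb ∈ visited then pvDfsGo e adj fuel visited rest
    else
      match fuel with
      | 0 => (false, visited)
      | fuel' + 1 =>
        match pvDfsGo e adj fuel' (visited ++ [nb]) (pvAdjGet adj nb) with
        | (true, v) => (true, v)
        | (false, v) => pvDfsGo e adj fuel' v rest
termination_by fuel _ nbrs => (fuel, nbrs.length)
decreasing_by all_goals simp_wf; omega

def pvReaches (s e : Int × Int) (adj : List ((Int × Int) × List (Int × Int))) : Bool :=
  (pvDfsGo e adj (s :: adj.flatMap (·.2)).length [s] (pvAdjGet adj s)).1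

-- B's loop body: build the adjacency reading direction bits by shifts, then DFS
def pvLoopB (m n : Int) (edges : List ((Int × Int) × (Int × Int))) (c : Int) (code : Int) : Int :=
  let adj := (PySem.List.enumerate edges).foldl (fun adj p =>
    if (code.toNat >>> (edges.length - 1 - p.1.toNat)) &&& 1 ≠ 0 then pvAdjAdd adj p.2.2 p.2.1
    else pvAdjAdd adj p.2.1 p.2.2) []
  if pvReaches (0, 0) (m - 1, n - 1) adj then c + 1 else c

def solution_alt (m : Int) (n : Int) : Int × Int :=
  let edges := pvMakeEdgesAlt m n
  let numEdges := edges.length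
  let count := (PySem.List.pyRange 0 ((2 : Int) ^ numEdges) 1).foldl (pvLoopB m n edges) (0 : Int)
  (count, (2 : Int) ^ numEdges)

-- ===== PRECONDITION & SPEC =====
def Spec_solution (m : Int) (n : Int) (out : Int × Int) : Prop := out = solution_alt m n
instance (m : Int) (n : Int) (out : Int × Int) : Decidable (Spec_solution m n out) := by unfold Spec_solution; infer_instance

-- ===== CLAIM (what is proved, stated in full; the proofs are below) =====
def Claim_equal_solution : Prop := ∀ (m : Int) (n : Int), Dom_solution m n → Spec_solution m n (solution m n)

-- ===== LEMMAS AND PROOFS =====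

-- the reachability specification shared by both traversals
def pvStep (adj : List ((Int × Int) × List (Int × Int))) (a b : Int × Int) : Prop :=
  b ∈ pvAdjGet adj a

def pvR (adj : List ((Int × Int) × List (Int × Int))) (s x : Int × Int) : Prop :=
  Relation.ReflTransGen (pvStep adj) s x

def pvS (adj : List ((Int × Int) × List (Int × Int))) (s e : Int × Int) : Prop :=
  ∃ x, pvR adj s x ∧ e ∈ pvAdjGet adj x

theorem pvAdjGet_subset (adj : List ((Int × Int) × List (Int × Int))) (x y : Int × Int)
    (h : y ∈ pvAdjGet adj x) : y ∈ adj.flatMap (·.2) := by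
  induction adj with
  | nil => simp [pvAdjGet] at h
  | cons p rest ih =>
    obtain ⟨k, s⟩ := p
    simp only [pvAdjGet] at h
    rw [List.flatMap_cons]
    by_cases hk : k = x
    · rw [if_pos hk] at h
      exact List.mem_append_left _ h
    · rw [if_neg hk] at h
      exact List.mem_append_right _ (ih h)

theorem pvClosed_not_S (adj : List ((Int × Int) × List (Int × Int))) (s e : Int × Int)
    (v : List (Int × Int)) (hs : s ∈ v)
    (hcl : ∀ x ∈ v, e ∉ pvAdjGet adj x ∧ ∀ y ∈ pvAdjGet adj x, y ∈ v) :
    ¬ pvS adj s e := by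
  rintro ⟨x, hR, he⟩
  have hmem : ∀ y : Int × Int, pvR adj s y → y ∈ v := by
    intro y hy
    induction hy with
    | refl => exact hs
    | tail _ hstep ih => exact (hcl _ ih).2 _ hstep
  exact (hcl x (hmem x hR)).1 he

theorem pvScanNbrs_none_iff (e : Int × Int) (nbrs v nn : List (Int × Int)) :
    pvScanNbrs e nbrs v nn = none ↔ e ∈ nbrs := by
  induction nbrs generalizing v nn with
  | nil => simp [pvScanNbrs]
  | cons nb rest ih =>
    simp only [pvScanNbrs]
    by_cases h1 : nb = e
    · simp [h1]
    · rw [if_neg h1]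
      have hmem : (e ∈ nb :: rest) ↔ e ∈ rest := by
        constructor
        · intro h
          rcases List.mem_cons.mp h with h | h
          · exact absurd h.symm h1
          · exact h
        · exact fun h => List.mem_cons_of_mem _ h
      by_cases h2 : nb ∈ v
      · rw [if_pos h2, ih, hmem]
      · rw [if_neg h2, ih, hmem]

theorem pvScanNbrs_some (e : Int × Int) (nbrs : List (Int × Int)) :
    ∀ (v nn v' nn' : List (Int × Int)), pvScanNbrs e nbrs v nn = some (v', nn') →
    ∃ d, v' = v ++ d ∧ nn' = nn ++ d ∧ (∀ x ∈ d, x ∈ nbrs ∧ x ∉ v) ∧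
      (∀ x ∈ nbrs, x ∈ v') ∧ (v.Nodup → v'.Nodup) := by
  induction nbrs with
  | nil =>
    intro v nn v' nn' h
    simp only [pvScanNbrs, Option.some.injEq, Prod.mk.injEq] at h
    obtain ⟨rfl, rfl⟩ := h
    exact ⟨[], by simp, by simp, by simp, by simp, fun hh => hh⟩
  | cons nb rest ih =>
    intro v nn v' nn' h
    simp only [pvScanNbrs] at h
    by_cases h1 : nb = e
    · rw [if_pos h1] at h
      simp at h
    · rw [if_neg h1] at h
      by_cases h2 : nb ∈ v
      · rw [if_pos h2] at h
        obtain ⟨d, hv, hnn, hd, hall, hnodup⟩ := ih v nn v' nn' h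
        refine ⟨d, hv, hnn, ?_, ?_, hnodup⟩
        · intro x hx
          obtain ⟨hx1, hx2⟩ := hd x hx
          exact ⟨List.mem_cons_of_mem _ hx1, hx2⟩
        · intro x hx
          rcases List.mem_cons.mp hx with rfl | hx
          · rw [hv]; exact List.mem_append_left _ h2
          · exact hall x hx
      · rw [if_neg h2] at h
        obtain ⟨d, hv, hnn, hd, hall, hnodup⟩ := ih (v ++ [nb]) (nn ++ [nb]) v' nn' h
        refine ⟨nb :: d, ?_, ?_, ?_, ?_, ?_⟩
        · rw [hv, List.append_assoc]; rfl
        · rw [hnn, List.append_assoc]; rfl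
        · intro x hx
          rcases List.mem_cons.mp hx with rfl | hx
          · exact ⟨by simp, h2⟩
          · obtain ⟨hx1, hx2⟩ := hd x hx
            exact ⟨List.mem_cons_of_mem _ hx1, fun hxv => hx2 (List.mem_append_left _ hxv)⟩
        · intro x hx
          rcases List.mem_cons.mp hx with rfl | hx
          · rw [hv]; exact List.mem_append_left _ (List.mem_append_right _ (by simp))
          · exact hall x hx
        · intro hvn
          apply hnodup
          rw [List.nodup_append]
          refine ⟨hvn, List.nodup_singleton _, ?_⟩
          intro a ha b hb
          simp only [List.mem_singleton] at hb
          subst hb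
          intro hab
          exact h2 (hab ▸ ha)

theorem pvScanLevel_none_iff (e : Int × Int) (adj : List ((Int × Int) × List (Int × Int)))
    (nodes : List (Int × Int)) :
    ∀ (v nn : List (Int × Int)),
    pvScanLevel e adj nodes v nn = none ↔ ∃ x ∈ nodes, e ∈ pvAdjGet adj x := by
  induction nodes with
  | nil => intro v nn; simp [pvScanLevel]
  | cons node rest ih =>
    intro v nn
    simp only [pvScanLevel]
    cases hscan : pvScanNbrs e (pvAdjGet adj node) v nn with
    | none =>
      exact iff_of_true rfl ⟨node, by simp, (pvScanNbrs_none_iff e _ v nn).mp hscan⟩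
    | some p =>
      obtain ⟨v1, nn1⟩ := p
      show pvScanLevel e adj rest v1 nn1 = none ↔ ∃ x ∈ node :: rest, e ∈ pvAdjGet adj x
      rw [ih v1 nn1]
      constructor
      · rintro ⟨x, hx, he⟩
        exact ⟨x, List.mem_cons_of_mem _ hx, he⟩
      · rintro ⟨x, hx, he⟩
        rcases List.mem_cons.mp hx with rfl | hx
        · have hne := (pvScanNbrs_none_iff e (pvAdjGet adj x) v nn).mpr he
          rw [hne] at hscan
          simp at hscan
        · exact ⟨x, hx, he⟩

theorem pvScanLevel_some (e : Int × Int) (adj : List ((Int × Int) × List (Int × Int)))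
    (nodes : List (Int × Int)) (v' nn' : List (Int × Int)) :
    ∀ (v nn : List (Int × Int)), pvScanLevel e adj nodes v nn = some (v', nn') →
    ∃ d, v' = v ++ d ∧ nn' = nn ++ d ∧
      (∀ x ∈ d, (∃ src ∈ nodes, x ∈ pvAdjGet adj src) ∧ x ∉ v) ∧
      (∀ src ∈ nodes, e ∉ pvAdjGet adj src ∧ ∀ y ∈ pvAdjGet adj src, y ∈ v') ∧
      (v.Nodup → v'.Nodup) := by
  induction nodes with
  | nil =>
    intro v nn h
    simp only [pvScanLevel, Option.some.injEq, Prod.mk.injEq] at h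
    obtain ⟨rfl, rfl⟩ := h
    exact ⟨[], by simp, by simp, by simp, by simp, fun hh => hh⟩
  | cons node rest ih =>
    intro v nn h
    simp only [pvScanLevel] at h
    cases hscan : pvScanNbrs e (pvAdjGet adj node) v nn with
    | none => rw [hscan] at h; simp at h
    | some p =>
      obtain ⟨v1, nn1⟩ := p
      rw [hscan] at h
      have h' : pvScanLevel e adj rest v1 nn1 = some (v', nn') := h
      obtain ⟨d1, hv1, hnn1, hd1, hall1, hnodup1⟩ := pvScanNbrs_some e _ v nn v1 nn1 hscan
      obtain ⟨d2, hv2, hnn2, hd2, hall2, hnodup2⟩ := ih v1 nn1 h'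
      refine ⟨d1 ++ d2, ?_, ?_, ?_, ?_, ?_⟩
      · rw [hv2, hv1, List.append_assoc]
      · rw [hnn2, hnn1, List.append_assoc]
      · intro x hx
        rcases List.mem_append.mp hx with hx | hx
        · obtain ⟨hxn, hxv⟩ := hd1 x hx
          exact ⟨⟨node, by simp, hxn⟩, hxv⟩
        · obtain ⟨⟨src, hsm, hxn⟩, hxv⟩ := hd2 x hx
          exact ⟨⟨src, List.mem_cons_of_mem _ hsm, hxn⟩,
            fun hxv0 => hxv (hv1 ▸ List.mem_append_left _ hxv0)⟩
      · intro src hsm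
        rcases List.mem_cons.mp hsm with rfl | hsm
        · constructor
          · intro he
            have hne := (pvScanNbrs_none_iff e (pvAdjGet adj src) v nn).mpr he
            rw [hne] at hscan
            simp at hscan
          · intro y hy
            rw [hv2]
            exact List.mem_append_left _ (hall1 y hy)
        · exact hall2 src hsm
      · intro hvn
        exact hnodup2 (hnodup1 hvn)

theorem pvBfsLoop_iff (adj : List ((Int × Int) × List (Int × Int))) (s e : Int × Int) :
    ∀ (fuel : Nat) (nodes visited : List (Int × Int)),
    (∀ x ∈ nodes, x ∈ visited) →
    (∀ x ∈ visited, pvR adj s x) →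
    s ∈ visited →
    visited.Nodup →
    (∀ x ∈ visited, x ∈ s :: adj.flatMap (·.2)) →
    (∀ x ∈ visited, x ∉ nodes → e ∉ pvAdjGet adj x ∧ ∀ y ∈ pvAdjGet adj x, y ∈ visited) →
    ((s :: adj.flatMap (·.2)).length + 1 ≤ fuel + visited.length) →
    (pvBfsLoop e adj fuel nodes visited = true ↔ pvS adj s e) := by
  intro fuel
  induction fuel with
  | zero =>
    intro nodes visited hsub hvR hs hnd hu hproc hfuel
    cases nodes with
    | nil =>
      simp only [pvBfsLoop, Bool.false_eq_true, false_iff]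
      exact pvClosed_not_S adj s e visited hs (fun x hx => hproc x hx (by simp))
    | cons a rest =>
      exfalso
      have hlen := (List.subperm_of_subset hnd (fun x hx => hu x hx)).length_le
      omega
  | succ fuel ih =>
    intro nodes visited hsub hvR hs hnd hu hproc hfuel
    cases nodes with
    | nil =>
      simp only [pvBfsLoop, Bool.false_eq_true, false_iff]
      exact pvClosed_not_S adj s e visited hs (fun x hx => hproc x hx (by simp))
    | cons node rest =>
      simp only [pvBfsLoop]
      cases hscan : pvScanLevel e adj (node :: rest) visited [] with
      | none =>
        obtain ⟨x, hx, he⟩ := (pvScanLevel_none_iff e adj (node :: rest) visited []).mp hscan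
        exact iff_of_true rfl ⟨x, hvR x (hsub x hx), he⟩
      | some p =>
        obtain ⟨v, nn⟩ := p
        show pvBfsLoop e adj fuel nn v = true ↔ pvS adj s e
        obtain ⟨d, hv, hnn, hd, hclosed, hnodup⟩ :=
          pvScanLevel_some e adj (node :: rest) v nn visited [] hscan
        simp only [List.nil_append] at hnn
        subst hnn
        have hsub' : ∀ x ∈ nn, x ∈ v := by
          intro x hx; rw [hv]; exact List.mem_append_right _ hx
        have hvR' : ∀ x ∈ v, pvR adj s x := by
          intro x hx
          rw [hv] at hx
          rcases List.mem_append.mp hx with hx | hx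
          · exact hvR x hx
          · obtain ⟨⟨src, hsm, hxN⟩, _⟩ := hd x hx
            exact (hvR src (hsub src hsm)).tail hxN
        have hs' : s ∈ v := by rw [hv]; exact List.mem_append_left _ hs
        have hnd' : v.Nodup := hnodup hnd
        have hu' : ∀ x ∈ v, x ∈ s :: adj.flatMap (·.2) := by
          intro x hx
          rw [hv] at hx
          rcases List.mem_append.mp hx with hx | hx
          · exact hu x hx
          · obtain ⟨⟨src, hsm, hxN⟩, _⟩ := hd x hx
            exact List.mem_cons_of_mem _ (pvAdjGet_subset adj src x hxN)
        have hproc' : ∀ x ∈ v, x ∉ nn →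
            e ∉ pvAdjGet adj x ∧ ∀ y ∈ pvAdjGet adj x, y ∈ v := by
          intro x hx hxd
          rw [hv] at hx
          rcases List.mem_append.mp hx with hx | hx
          · by_cases hxn : x ∈ node :: rest
            · exact hclosed x hxn
            · obtain ⟨hh1, hh2⟩ := hproc x hx hxn
              exact ⟨hh1, fun y hy => by rw [hv]; exact List.mem_append_left _ (hh2 y hy)⟩
          · exact absurd hx hxd
        by_cases hdnil : nn = []
        · subst hdnil
          have hfalse : pvBfsLoop e adj fuel [] v = false := by cases fuel <;> rfl
          rw [hfalse]
          simp only [Bool.false_eq_true, false_iff]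
          exact pvClosed_not_S adj s e v hs' (fun x hx => hproc' x hx (by simp))
        · have hdpos : 0 < nn.length := by
            cases nn with
            | nil => exact absurd rfl hdnil
            | cons a t => simp
          have hlen : v.length = visited.length + nn.length := by
            rw [hv, List.length_append]
          exact ih nn v hsub' hvR' hs' hnd' hu' hproc' (by omega)

theorem pvDfsGo_main (adj : List ((Int × Int) × List (Int × Int))) (s e : Int × Int)
    (fuel : Nat) (visited nbrs : List (Int × Int)) (src : Int × Int)
    (hnd : visited.Nodup)
    (hu : ∀ x ∈ visited, x ∈ s :: adj.flatMap (·.2))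
    (hvR : ∀ x ∈ visited, pvR adj s x)
    (hsrc : pvR adj s src)
    (hnbrs : ∀ y ∈ nbrs, y ∈ pvAdjGet adj src)
    (hfuel : (s :: adj.flatMap (·.2)).length ≤ fuel + visited.length) :
    ((pvDfsGo e adj fuel visited nbrs).1 = true → pvS adj s e) ∧
    ((pvDfsGo e adj fuel visited nbrs).1 = false →
      ∃ d, (pvDfsGo e adj fuel visited nbrs).2 = visited ++ d ∧
        (pvDfsGo e adj fuel visited nbrs).2.Nodup ∧
        (∀ x ∈ (pvDfsGo e adj fuel visited nbrs).2, x ∈ s :: adj.flatMap (·.2)) ∧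
        (∀ x ∈ (pvDfsGo e adj fuel visited nbrs).2, pvR adj s x) ∧
        (∀ x ∈ d, e ∉ pvAdjGet adj x ∧ ∀ y ∈ pvAdjGet adj x, y ∈ (pvDfsGo e adj fuel visited nbrs).2) ∧
        (∀ nb ∈ nbrs, nb ≠ e ∧ nb ∈ (pvDfsGo e adj fuel visited nbrs).2)) := by
  cases nbrs with
  | nil =>
    simp only [pvDfsGo]
    exact ⟨fun h => by simp at h,
      fun _ => ⟨[], by simp, hnd, hu, hvR, by simp, by simp⟩⟩
  | cons nb rest =>
    by_cases h1 : nb = e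
    · have heqT : pvDfsGo e adj fuel visited (nb :: rest) = (true, visited) := by
        cases fuel <;> (simp only [pvDfsGo]; rw [if_pos h1])
      rw [heqT]
      exact ⟨fun _ => ⟨src, hsrc, h1 ▸ hnbrs nb (by simp)⟩, fun h => by simp at h⟩
    · by_cases h2 : nb ∈ visited
      · have heq : pvDfsGo e adj fuel visited (nb :: rest) = pvDfsGo e adj fuel visited rest := by
          cases fuel <;> (simp only [pvDfsGo]; rw [if_neg h1, if_pos h2])
        rw [heq]
        obtain ⟨hT, hF⟩ := pvDfsGo_main adj s e fuel visited rest src hnd hu hvR hsrc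
          (fun y hy => hnbrs y (List.mem_cons_of_mem _ hy)) hfuel
        refine ⟨hT, fun hf => ?_⟩
        obtain ⟨d, ha, hb, hc, hdd, he2, hg⟩ := hF hf
        refine ⟨d, ha, hb, hc, hdd, he2, ?_⟩
        intro x hx
        rcases List.mem_cons.mp hx with rfl | hx
        · exact ⟨h1, ha ▸ List.mem_append_left _ h2⟩
        · exact hg x hx
      · have hnbU : nb ∈ s :: adj.flatMap (·.2) :=
          List.mem_cons_of_mem _ (pvAdjGet_subset adj src nb (hnbrs nb (by simp)))
        have hnd2 : (visited ++ [nb]).Nodup := by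
          rw [List.nodup_append]
          refine ⟨hnd, List.nodup_singleton _, ?_⟩
          intro a ha b hb
          simp only [List.mem_singleton] at hb
          subst hb
          intro hab
          exact h2 (hab ▸ ha)
        have hu2 : ∀ x ∈ visited ++ [nb], x ∈ s :: adj.flatMap (·.2) := by
          intro x hx
          rcases List.mem_append.mp hx with hx | hx
          · exact hu x hx
          · simp only [List.mem_singleton] at hx; subst hx; exact hnbU
        cases fuel with
        | zero =>
          exfalso
          have hlen := (List.subperm_of_subset hnd2 (fun x hx => hu2 x hx)).length_le
          simp only [List.length_append, List.length_cons, List.length_nil] at hlen hfuel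
          omega
        | succ fuel' =>
          have hstep : pvDfsGo e adj (fuel' + 1) visited (nb :: rest)
              = match pvDfsGo e adj fuel' (visited ++ [nb]) (pvAdjGet adj nb) with
                | (true, v) => (true, v)
                | (false, v) => pvDfsGo e adj fuel' v rest := by
            simp only [pvDfsGo]
            rw [if_neg h1, if_neg h2]
          have hRnb : pvR adj s nb := hsrc.tail (hnbrs nb (by simp))
          have hvR2 : ∀ x ∈ visited ++ [nb], pvR adj s x := by
            intro x hx
            rcases List.mem_append.mp hx with hx | hx
            · exact hvR x hx
            · simp only [List.mem_singleton] at hx; subst hx; exact hRnb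
          obtain ⟨hdT, hdF⟩ := pvDfsGo_main adj s e fuel' (visited ++ [nb]) (pvAdjGet adj nb) nb
            hnd2 hu2 hvR2 hRnb (fun y hy => hy)
            (by simp only [List.length_append, List.length_cons, List.length_nil] at hfuel ⊢
                omega)
          cases hcall : pvDfsGo e adj fuel' (visited ++ [nb]) (pvAdjGet adj nb) with
          | mk r v =>
            rw [hcall] at hdT hdF
            cases r with
            | true =>
              rw [hstep, hcall]
              exact ⟨fun _ => hdT rfl, fun h => by simp at h⟩
            | false =>
              obtain ⟨d1, ha1, hb1, hc1, hd1, he1, hg1⟩ := hdF rfl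
              simp only at ha1 hb1 hc1 hd1 he1 hg1
              obtain ⟨hT2, hF2⟩ := pvDfsGo_main adj s e fuel' v rest src hb1 hc1 hd1 hsrc
                (fun y hy => hnbrs y (List.mem_cons_of_mem _ hy))
                (by rw [ha1]
                    simp only [List.length_append, List.length_cons, List.length_nil] at hfuel ⊢
                    omega)
              rw [hstep, hcall]
              refine ⟨hT2, fun hf => ?_⟩
              obtain ⟨d2, ha2, hb2, hc2, hd2, he2, hg2⟩ := hF2 hf
              refine ⟨nb :: (d1 ++ d2), ?_, hb2, hc2, hd2, ?_, ?_⟩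
              · rw [ha2, ha1]
                simp [List.append_assoc]
              · intro x hx
                rcases List.mem_cons.mp hx with rfl | hx
                · constructor
                  · intro hee
                    exact (hg1 e hee).1 rfl
                  · intro y hy
                    rw [ha2]
                    exact List.mem_append_left _ ((hg1 y hy).2)
                · rcases List.mem_append.mp hx with hx | hx
                  · obtain ⟨hxe, hxc⟩ := he1 x hx
                    exact ⟨hxe, fun y hy => by rw [ha2]; exact List.mem_append_left _ (hxc y hy)⟩
                  · exact he2 x hx
              · intro x hx
                rcases List.mem_cons.mp hx with rfl | hx
                · refine ⟨h1, ?_⟩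
                  rw [ha2, ha1]
                  exact List.mem_append_left _ (List.mem_append_left _
                    (List.mem_append_right _ (by simp)))
                · exact hg2 x hx
termination_by (fuel, nbrs.length)

theorem pvReach_eq (adj : List ((Int × Int) × List (Int × Int))) (s e : Int × Int) :
    pvExistsPath s e adj = pvReaches s e adj := by
  unfold pvExistsPath pvReaches
  have hbfs := pvBfsLoop_iff adj s e (s :: adj.flatMap (·.2)).length [s] [s]
    (fun x hx => hx)
    (by intro x hx; simp only [List.mem_singleton] at hx; subst hx; exact Relation.ReflTransGen.refl)
    (by simp)
    (List.nodup_singleton _)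
    (by intro x hx; simp only [List.mem_singleton] at hx; subst hx; exact List.mem_cons_self ..)
    (by intro x hx hnx; exact absurd hx hnx)
    (by simp)
  obtain ⟨hT, hF⟩ := pvDfsGo_main adj s e (s :: adj.flatMap (·.2)).length [s] (pvAdjGet adj s) s
    (List.nodup_singleton _)
    (by intro x hx; simp only [List.mem_singleton] at hx; subst hx; exact List.mem_cons_self ..)
    (by intro x hx; simp only [List.mem_singleton] at hx; subst hx; exact Relation.ReflTransGen.refl)
    Relation.ReflTransGen.refl
    (fun y hy => hy)
    (by simp)
  cases hr : (pvDfsGo e adj (s :: adj.flatMap (·.2)).length [s] (pvAdjGet adj s)).1 with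
  | true =>
    exact hbfs.mpr (hT hr)
  | false =>
    have hnS : ¬ pvS adj s e := by
      obtain ⟨d, hv, hnd, hu, hR, hcl, hnb⟩ := hF hr
      apply pvClosed_not_S adj s e ((pvDfsGo e adj (s :: adj.flatMap (·.2)).length [s] (pvAdjGet adj s)).2)
      · rw [hv]; exact List.mem_append_left _ (by simp)
      · intro x hx
        rw [hv] at hx
        rcases List.mem_append.mp hx with hx | hx
        · simp only [List.mem_singleton] at hx
          subst hx
          constructor
          · intro he; exact (hnb e he).1 rfl
          · intro y hy; exact (hnb y hy).2
        · exact hcl x hx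
    cases hb : pvBfsLoop e adj (s :: adj.flatMap (·.2)).length [s] [s] with
    | false => rfl
    | true => exact absurd (hbfs.mp hb) hnS

-- digit/bit agreement
theorem pvNatBinDigits_len : ∀ (w i : Nat), i < 2 ^ w → (pvNatBinDigits i).length ≤ w := by
  intro w
  induction w with
  | zero =>
    intro i hi
    have hiz : i = 0 := by omega
    subst hiz
    simp [pvNatBinDigits]
  | succ w ih =>
    intro i hi
    match i with
    | 0 => simp [pvNatBinDigits]
    | Nat.succ n =>
      rw [pvNatBinDigits]
      have hp : (2 : Nat) ^ (w + 1) = 2 * 2 ^ w := by ring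
      have hh := ih ((n + 1) / 2) (by omega)
      simp only [List.length_append, List.length_cons, List.length_nil]
      omega

theorem pvFormatBin_length (w i : Nat) (hi : i < 2 ^ w) (hw : 1 ≤ w) :
    (pvFormatBin i w).length = w := by
  unfold pvFormatBin
  split_ifs with h
  · simp only [List.length_append, List.length_replicate, List.length_cons, List.length_nil]
    omega
  · simp only [List.length_append, List.length_replicate]
    have := pvNatBinDigits_len w i hi
    omega

theorem pvFormatBin_succ (w i : Nat) :
    pvFormatBin i (w + 2) = pvFormatBin (i / 2) (w + 1) ++ [i % 2] := by
  match i with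
  | 0 =>
    simp only [pvFormatBin]
    norm_num
    rw [List.replicate_succ', List.append_assoc]
    rfl
  | 1 =>
    have h1 : pvNatBinDigits 1 = [1] := by
      rw [show (1 : Nat) = 0 + 1 from rfl, pvNatBinDigits]
      norm_num [pvNatBinDigits]
    simp only [pvFormatBin]
    norm_num [h1]
    rw [List.replicate_succ', List.append_assoc]
    rfl
  | Nat.succ (Nat.succ n) =>
    have hd : pvNatBinDigits (n + 2) = pvNatBinDigits ((n + 2) / 2) ++ [(n + 2) % 2] := by
      rw [pvNatBinDigits]
    have hq0 : (n + 2) / 2 ≠ 0 := by omega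
    simp only [pvFormatBin, hd, if_neg (by omega : ¬ n + 2 = 0), if_neg hq0]
    simp only [List.length_append, List.length_cons, List.length_nil]
    rw [show w + 2 - ((pvNatBinDigits ((n + 2) / 2)).length + 1)
        = (w + 1 - (pvNatBinDigits ((n + 2) / 2)).length) + 0 from by omega]
    simp only [List.append_assoc, Nat.add_zero]

theorem pvFormatBin_getD : ∀ (w c k : Nat), c < 2 ^ (w + 1) → k < w + 1 →
    (pvFormatBin c (w + 1)).getD k 0 = (c >>> (w - k)) &&& 1 := by
  intro w
  induction w with
  | zero =>
    intro c k hc hk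
    have hk0 : k = 0 := by omega
    subst hk0
    have hc01 : c = 0 ∨ c = 1 := by omega
    rcases hc01 with rfl | rfl
    · simp [pvFormatBin]
    · have h1 : pvNatBinDigits 1 = [1] := by
        rw [show (1 : Nat) = 0 + 1 from rfl, pvNatBinDigits]
        norm_num [pvNatBinDigits]
      simp [pvFormatBin, h1]
  | succ w ih =>
    intro c k hc hk
    rw [show w + 1 + 1 = w + 2 from rfl, pvFormatBin_succ]
    have hp : (2 : Nat) ^ (w + 2) = 2 * 2 ^ (w + 1) := by ring
    have hlen : (pvFormatBin (c / 2) (w + 1)).length = w + 1 :=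
      pvFormatBin_length (w + 1) (c / 2) (by omega) (by omega)
    by_cases hkw : k < w + 1
    · rw [List.getD_append _ _ _ k (by rw [hlen]; exact hkw)]
      rw [ih (c / 2) k (by omega) hkw]
      rw [show w + 1 - k = 1 + (w - k) from by omega, Nat.shiftRight_add, Nat.shiftRight_one]
    · have hkeq : k = w + 1 := by omega
      subst hkeq
      rw [List.getD_append_right _ _ _ _ (le_of_eq hlen), hlen]
      simp [Nat.and_one_is_mod]

theorem pvFormatBin_getD' (E c k : Nat) (hc : c < 2 ^ E) (hk : k < E) :
    (pvFormatBin c E).getD k 0 = (c >>> (E - 1 - k)) &&& 1 := by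
  obtain ⟨w, rfl⟩ : ∃ w, E = w + 1 := ⟨E - 1, by omega⟩
  rw [show w + 1 - 1 - k = w - k from by omega]
  exact pvFormatBin_getD w c k hc hk

theorem pvAdj_eq (edges : List ((Int × Int) × (Int × Int))) (c : Nat)
    (hc : c < 2 ^ edges.length) :
    pvMakeNeighbours edges (pvFormatBin c edges.length)
      = (PySem.List.enumerate edges).foldl (fun adj p =>
          if (c >>> (edges.length - 1 - p.1.toNat)) &&& 1 ≠ 0 then pvAdjAdd adj p.2.2 p.2.1
          else pvAdjAdd adj p.2.1 p.2.2) [] := by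
  unfold pvMakeNeighbours
  apply PySem.List.foldl_congr_mem
  intro adj p hp
  rw [PySem.List.mem_enumerate_iff] at hp
  obtain ⟨k, hk, rfl⟩ := hp
  simp only [zero_add, Int.toNat_natCast, PySem.List.pyGetD_natCast]
  rw [pvFormatBin_getD' edges.length c k hc hk]

theorem pvEdges_eq (m n : Int) : pvMakeEdgesAlt m n = pvMakeEdges m n := by
  unfold pvMakeEdges pvMakeEdgesAlt
  have h2 : (fun (acc : List ((Int × Int) × (Int × Int))) (i : Int) =>
        (PySem.List.pyRange 0 n 1).foldl (fun acc j =>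
          let acc := if i < m - 1 then acc ++ [((i, j), (i + 1, j))] else acc
          if j < n - 1 then acc ++ [((i, j), (i, j + 1))] else acc) acc)
      = fun acc i => acc ++ (PySem.List.pyRange 0 n 1).flatMap (fun j =>
          (if i < m - 1 then [((i, j), (i + 1, j))] else []) ++
          (if j < n - 1 then [((i, j), (i, j + 1))] else [])) := by
    funext acc i
    have h1 : (fun (acc : List ((Int × Int) × (Int × Int))) (j : Int) =>
          let acc := if i < m - 1 then acc ++ [((i, j), (i + 1, j))] else acc
          if j < n - 1 then acc ++ [((i, j), (i, j + 1))] else acc)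
        = fun acc j => acc ++
            ((if i < m - 1 then [((i, j), (i + 1, j))] else []) ++
             (if j < n - 1 then [((i, j), (i, j + 1))] else [])) := by
      funext acc j
      dsimp only
      split_ifs <;> simp
    rw [h1, PySem.List.foldl_append_eq_flatMap]
  rw [h2, PySem.List.foldl_append_eq_flatMap]
  simp

theorem pvCountA (m n : Int) (edges : List ((Int × Int) × (Int × Int))) :
    ∀ (l : List Int) (c : Int) (f : List Int),
    (l.foldl (pvLoopA m n edges) (c, f)).1
      = l.foldl (fun c i =>
          if pvExistsPath (0, 0) (m - 1, n - 1)
              (pvMakeNeighbours edges (pvFormatBin i.toNat edges.length))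
          then c + 1 else c) c := by
  intro l
  induction l with
  | nil => intro c f; rfl
  | cons x t ih =>
    intro c f
    simp only [List.foldl_cons, pvLoopA]
    by_cases h : pvExistsPath (0, 0) (m - 1, n - 1)
        (pvMakeNeighbours edges (pvFormatBin x.toNat edges.length)) = true
    · rw [if_pos h, if_pos h]
      exact ih _ _
    · rw [if_neg h, if_neg h]
      exact ih _ _

-- ===== VERDICT (by name: the statement is the Claim_ definition above) =====
theorem solution_spec : Claim_equal_solution := by
  unfold Claim_equal_solution Spec_solution
  intro m n _
  simp only [solution, solution_alt]
  rw [pvEdges_eq]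
  refine Prod.ext ?_ rfl
  rw [pvCountA]
  apply PySem.List.foldl_congr_mem
  intro c i hi
  rw [PySem.List.mem_pyRange_one] at hi
  obtain ⟨h0, hlt⟩ := hi
  have hcast : ((2 ^ (pvMakeEdges m n).length : Nat) : Int) = 2 ^ (pvMakeEdges m n).length := by
    push_cast
    ring
  have hc : i.toNat < 2 ^ (pvMakeEdges m n).length := by
    rw [Int.toNat_lt h0, hcast]
    exact hlt
  simp only [pvLoopB]
  rw [pvAdj_eq (pvMakeEdges m n) i.toNat hc, pvReach_eq]
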